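-- pv_equiv track=rewrite | github.com/masanzashimba/feistel-cipher | MASANZA_SHIMBA.py | decalage
-- ===== SOURCE A (Python) =====
-- def decalage(val, ordre, gauche):
--     Result= ""
--     table_k = [""] * len(val)
--     s = -1 if gauche else 1
--     for i in range(len(val)):
--         v1 = val[i:i + 1]
--         o = ordre
--         j = i
--         while o > 0:
--             if j + s < 0:
--                 j = len(val) - 1
--             elif j + s >= len(val):
--                 j = 0
--             else:
--                 j = j + s
--             o -= 1
--         table_k[j] = v1
--     Result= "".join(table_k)
--     return Result
-- ===== SOURCE B (Python) =====
-- def decalage(val, ordre, gauche):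
--     n = len(val)
--     if n == 0 or ordre <= 0:
--         return val
--     k = ordre % n
--     if gauche:
--         return val[k:] + val[:k]
--     return val[n - k:] + val[:n - k]
-- ===== Notes on version B (the rewrite author's own statement) =====
-- stated objective: faster
-- what changed: B replaces A's per-character loop (which walks each index `ordre` wraparound steps to find its destination) by a single closed-form rotation: k = ordre % n and two slice concatenations; non-positive ordre and the empty string perform no shift, as in A.
import Mathlib
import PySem

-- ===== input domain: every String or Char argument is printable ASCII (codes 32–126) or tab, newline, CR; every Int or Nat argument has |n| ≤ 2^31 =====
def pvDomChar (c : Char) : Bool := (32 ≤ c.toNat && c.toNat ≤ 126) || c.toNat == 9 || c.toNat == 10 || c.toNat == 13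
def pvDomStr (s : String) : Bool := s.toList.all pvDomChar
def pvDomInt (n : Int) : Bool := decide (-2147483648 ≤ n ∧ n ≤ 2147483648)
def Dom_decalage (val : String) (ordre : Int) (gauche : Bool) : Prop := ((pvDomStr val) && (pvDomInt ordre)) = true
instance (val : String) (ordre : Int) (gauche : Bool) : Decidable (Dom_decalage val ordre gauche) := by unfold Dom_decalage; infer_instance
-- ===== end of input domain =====

-- B replaces A's per-character placement loop (each source index walked `ordre` wraparound steps) by a
-- single closed-form rotation built from two slices; objective: faster/simpler.

-- ===== PORT A =====
-- the body of A's inner `while o > 0` loop: one wraparound step of j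
def pvStep (n : Int) (s : Int) (j : Int) : Int :=
  if j + s < 0 then n - 1
  else if j + s ≥ n then 0
  else j + s

-- A's `while o > 0: … ; o -= 1` loop, run on o = max(ordre,0) iterations
def pvWhile (n : Int) (s : Int) : Nat → Int → Int
  | 0, j => j
  | o + 1, j => pvWhile n s o (pvStep n s j)

def decalage (val : String) (ordre : Int) (gauche : Bool) : String :=
  let n : Int := PySem.Str.len val
  let s : Int := if gauche then -1 else 1
  let table :=
    (PySem.List.pyRange 0 n 1).foldl
      (fun tbl i =>
        let v1 := PySem.Str.slice val (some i) (some (i + 1))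
        let j := pvWhile n s ordre.toNat i
        tbl.set j.toNat v1)
      (List.replicate n.toNat "")
  PySem.Str.join "" table

-- ===== PORT B =====
def decalage_alt (val : String) (ordre : Int) (gauche : Bool) : String :=
  let n : Int := PySem.Str.len val
  if n = 0 ∨ ordre ≤ 0 then val
  else
    let k := PySem.Int.mod ordre n
    if gauche then
      PySem.Str.slice val (some k) none ++ PySem.Str.slice val none (some k)
    else
      PySem.Str.slice val (some (n - k)) none ++ PySem.Str.slice val none (some (n - k))

-- ===== PRECONDITION & SPEC =====
def Spec_decalage (val : String) (ordre : Int) (gauche : Bool) (out : String) : Prop := out = decalage_alt val ordre gauche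
instance (val : String) (ordre : Int) (gauche : Bool) (out : String) : Decidable (Spec_decalage val ordre gauche out) := by unfold Spec_decalage; infer_instance

-- ===== CLAIM (what is proved, stated in full; the proofs are below) =====
def Claim_equal_decalage : Prop := ∀ (val : String) (ordre : Int) (gauche : Bool), Dom_decalage val ordre gauche → Spec_decalage val ordre gauche (decalage val ordre gauche)

-- ===== LEMMAS AND PROOFS =====

-- proof-side abstraction of A's table-filling fold
def pvFill (N : Nat) (g : Nat → Nat) (w : Nat → String) (k : Nat) : List String :=
  (List.range k).foldl (fun tbl i => tbl.set (g i) (w i)) (List.replicate N "")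

theorem pvFill_length (N : Nat) (g : Nat → Nat) (w : Nat → String) (k : Nat) :
    (pvFill N g w k).length = N := by
  induction k with
  | zero => simp [pvFill]
  | succ k ih => simp [pvFill, List.range_succ, List.foldl_append] at *; omega

theorem pvFill_spec (N : Nat) (g h : Nat → Nat) (w : Nat → String)
    (hgh : ∀ m, m < N → g (h m) = m) (hhg : ∀ i, i < N → h (g i) = i) :
    ∀ k, k ≤ N → ∀ m, m < N →
      (pvFill N g w k)[m]? = some (if h m < k then w (h m) else "") := by
  intro k
  induction k with
  | zero =>
    intro _ m hm
    simp [pvFill, hm]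
  | succ k ih =>
    intro hk m hm
    have hk' : k ≤ N := by omega
    have hfill : pvFill N g w (k + 1) = (pvFill N g w k).set (g k) (w k) := by
      simp [pvFill, List.range_succ, List.foldl_append]
    by_cases hmg : m = g k
    · subst hmg
      have hkN : k < N := by omega
      have hhgk : h (g k) = k := hhg k hkN
      have hmlen : g k < (pvFill N g w k).length := by rw [pvFill_length]; exact hm
      rw [hfill, List.getElem?_set_self hmlen, hhgk]
      simp
    · rw [hfill, List.getElem?_set_ne (fun hc => hmg hc.symm)]
      rw [ih hk' m hm]
      have hne : h m ≠ k := by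
        intro hc
        apply hmg
        rw [← hgh m hm, hc]
      by_cases hlt : h m < k
      · simp [hlt, (by omega : h m < k + 1)]
      · rw [if_neg hlt, if_neg (by omega : ¬ h m < k + 1)]

theorem pvFill_eq_map (N : Nat) (g h : Nat → Nat) (w : Nat → String)
    (hhN : ∀ m, m < N → h m < N)
    (hgh : ∀ m, m < N → g (h m) = m) (hhg : ∀ i, i < N → h (g i) = i) :
    pvFill N g w N = (List.range N).map (fun m => w (h m)) := by
  apply List.ext_getElem?
  intro m
  by_cases hm : m < N
  · rw [pvFill_spec N g h w hgh hhg N (le_refl N) m hm]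
    simp [hm, hhN m hm]
  · have h1 : (pvFill N g w N).length ≤ m := by rw [pvFill_length]; omega
    rw [List.getElem?_eq_none h1]
    simp; omega

theorem emod_eq_of_close (a r n : Int) (h : r = a ∨ r = a + n ∨ r = a - n)
    (h0 : 0 ≤ r) (h1 : r < n) : a % n = r := by
  rcases h with h | h | h
  · rw [h] at h0 h1 ⊢; exact Int.emod_eq_of_lt h0 h1
  · have ha : a % n = (a + n) % n := Int.emod_eq_add_self_emod
    rw [ha, ← h]; exact Int.emod_eq_of_lt h0 h1
  · have ha : a % n = (a - n) % n := (Int.sub_emod_right a n).symm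
    rw [ha, ← h]; exact Int.emod_eq_of_lt h0 h1

theorem pvStep_emod (n s j : Int) (hs : s = 1 ∨ s = -1) (h0 : 0 ≤ j) (h1 : j < n) :
    pvStep n s j = (j + s) % n := by
  unfold pvStep
  split_ifs with hc1 hc2
  · exact (emod_eq_of_close _ _ _ (by omega) (by omega) (by omega)).symm
  · exact (emod_eq_of_close _ _ _ (by omega) (by omega) (by omega)).symm
  · exact (emod_eq_of_close _ _ _ (by omega) (by omega) (by omega)).symm

theorem pvWhile_emod (n s : Int) (hn : 0 < n) (hs : s = 1 ∨ s = -1) :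
    ∀ (o : Nat) (j : Int), 0 ≤ j → j < n → pvWhile n s o j = (j + s * o) % n := by
  intro o
  induction o with
  | zero => intro j h0 h1; simp [pvWhile]; exact (Int.emod_eq_of_lt h0 h1).symm
  | succ o ih =>
    intro j h0 h1
    rw [pvWhile, pvStep_emod n s j hs h0 h1]
    rw [ih _ (Int.emod_nonneg _ (by omega)) (Int.emod_lt_of_pos _ hn)]
    have hmm : (j + s) % n % n = (j + s) % n := Int.emod_emod_of_dvd _ dvd_rfl
    rw [Int.add_emod ((j + s) % n) (s * o) n, hmm, ← Int.add_emod]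
    congr 1
    push_cast
    ring

-- A's definition, rewritten as a pvFill fold
theorem decalage_eq_fill (val : String) (ordre : Int) (gauche : Bool) :
    decalage val ordre gauche =
      PySem.Str.join "" (pvFill val.toList.length
        (fun i => (pvWhile (val.toList.length : Int) (if gauche then -1 else 1) ordre.toNat (i : Int)).toNat)
        (fun i => PySem.Str.slice val (some (i : Int)) (some ((i : Int) + 1)))
        val.toList.length) := by
  simp [decalage, pvFill, PySem.List.pyRange_one, List.foldl_map]

theorem slice_one_toList (val : String) (i : Nat) (hi : i < val.toList.length) :
    (PySem.Str.slice val (some (i : Int)) (some ((i : Int) + 1))).toList = [val.toList[i]] := by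
  rw [PySem.Str.toList_slice]
  simp only [PySem.Chars.slice_eq_listSlice]
  have h1 : ((i : Int) + 1) = ((i : Int) + ((1 : Nat) : Int)) := by norm_cast
  rw [h1, PySem.List.slice_natCast_add]
  rw [List.drop_eq_getElem_cons hi]
  rfl

theorem join_map_chars (val : String) (N : Nat) (hN : N = val.toList.length) (h : Nat → Nat)
    (hhN : ∀ m, m < N → h m < N) :
    (PySem.Str.join "" ((List.range N).map
        (fun m => PySem.Str.slice val (some ((h m : Nat) : Int)) (some (((h m : Nat) : Int) + 1))))).toList
      = (List.range N).map (fun m => val.toList.getD (h m) ' ') := by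
  rw [PySem.Str.toList_join]
  rw [List.map_map]
  have heq : (List.map (String.toList ∘ fun m => PySem.Str.slice val (some ((h m : Nat) : Int)) (some (((h m : Nat) : Int) + 1))) (List.range N))
       = List.map ((fun c => [c]) ∘ (fun m => val.toList.getD (h m) ' ')) (List.range N) := by
    apply List.map_congr_left
    intro m hm
    have hm' : m < N := List.mem_range.mp hm
    have hhm : h m < val.toList.length := by rw [← hN]; exact hhN m hm'
    simp only [Function.comp_apply]
    rw [slice_one_toList val (h m) hhm]
    rw [List.getD_eq_getElem _ _ hhm]
  rw [heq, ← List.map_map]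
  have he : ("" : String).toList = [] := rfl
  rw [he, PySem.Chars.join_nil_singletons]

theorem toNat_emod_cast (x : Int) (N c : Nat) (h : x ≡ (c : Int) [ZMOD (N : Int)]) :
    (x % (N : Int)).toNat = c % N := by
  have h1 : x % (N : Int) = (c : Int) % N := h
  rw [h1, ← Int.natCast_emod, Int.toNat_natCast]

-- ===== VERDICT (by name: the statement is the Claim_ definition above) =====
theorem decalage_spec : Claim_equal_decalage := by
  intro val ordre gauche _
  unfold Spec_decalage
  refine String.toList_inj.mp ?_
  rw [decalage_eq_fill]
  by_cases hN0 : val.toList.length = 0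
  · -- empty string: table is empty, B returns val = ""
    have hnil : val.toList = [] := List.eq_nil_iff_length_eq_zero.mpr hN0
    rw [hN0]
    simp [decalage_alt, pvFill, PySem.Str.toList_join, hnil, PySem.Chars.join]
    rfl
  · have hN : 0 < val.toList.length := Nat.pos_of_ne_zero hN0
    have hNI : (0 : Int) < (val.toList.length : Int) := by exact_mod_cast hN
    set l := val.toList with hl
    set N := l.length with hNdef
    set s : Int := if gauche then -1 else 1 with hsdef
    have hs : s = 1 ∨ s = -1 := by
      rcases gauche with _ | _ <;> simp [hsdef]
    by_cases hOrd : ordre ≤ 0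
    · -- no shift is performed: A fills table[i] = val[i], B returns val
      have ht0 : ordre.toNat = 0 := Int.toNat_of_nonpos hOrd
      have hg : ∀ i, i < N → (pvWhile (N : Int) s ordre.toNat (i : Int)).toNat = i := by
        intro i hi
        rw [ht0]
        simp [pvWhile]
      have hfill := pvFill_eq_map N
        (fun i => (pvWhile (N : Int) s ordre.toNat (i : Int)).toNat)
        (fun m => m)
        (fun i => PySem.Str.slice val (some (i : Int)) (some ((i : Int) + 1)))
        (fun m hm => hm) (fun m hm => hg m hm) (fun i hi => by simpa using hg i hi)
      rw [hfill, join_map_chars val N rfl (fun m => m) (fun m hm => hm)]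
      have hB : decalage_alt val ordre gauche = val := by
        simp [decalage_alt, hOrd]
      rw [hB]
      apply List.ext_getElem
      · simp [hNdef, hl, String.length_toList]
      · intro m hm1 hm2
        simp only [List.getElem_map, List.getElem_range]
        rw [List.getD_eq_getElem _ _ (by simpa using hm2)]
    · -- a real shift: both sides are the rotation of val by ordre % N
      have hOrdPos : 0 < ordre := by omega
      have hONat : ((ordre.toNat : Nat) : Int) = ordre := Int.toNat_of_nonneg (by omega)
      set t := ordre.toNat with htdef
      set T : Int := s * (t : Int) with hTdef
      have hgchar : ∀ i, i < N → pvWhile (N : Int) s t (i : Int) = ((i : Int) + T) % N := by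
        intro i hi
        exact pvWhile_emod (N : Int) s hNI hs t (i : Int) (by positivity) (by exact_mod_cast hi)
      set h : Nat → Nat := fun m => ((((m : Int) - T) % (N : Int)).toNat) with hhdef
      have hmodN : ∀ x : Int, 0 ≤ x % (N : Int) ∧ x % (N : Int) < (N : Int) := by
        intro x
        exact ⟨Int.emod_nonneg _ (by omega), Int.emod_lt_of_pos _ hNI⟩
      have hhN : ∀ m, m < N → h m < N := by
        intro m hm
        have := hmodN ((m : Int) - T)
        simp only [hhdef]
        omega
      have hhcast : ∀ m : Nat, ((h m : Nat) : Int) = ((m : Int) - T) % N := by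
        intro m
        simp only [hhdef]
        exact Int.toNat_of_nonneg (hmodN _).1
      have hgh : ∀ m, m < N → (pvWhile (N : Int) s t ((h m : Nat) : Int)).toNat = m := by
        intro m hm
        rw [hgchar (h m) (hhN m hm), hhcast m]
        have e1 : ((m : Int) - T) % N + T ≡ ((m : Int) - T) + T [ZMOD (N : Int)] :=
          Int.ModEq.add (Int.emod_emod_of_dvd _ dvd_rfl) (Int.ModEq.refl T)
        have e2 : ((m : Int) - T) + T = (m : Int) := by ring
        have e3 := e1
        rw [e2] at e3
        rw [toNat_emod_cast (((m : Int) - T) % N + T) N m e3, Nat.mod_eq_of_lt hm]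
      have hhg : ∀ i, i < N → h ((pvWhile (N : Int) s t (i : Int)).toNat) = i := by
        intro i hi
        rw [hgchar i hi]
        simp only [hhdef]
        rw [Int.toNat_of_nonneg (hmodN _).1]
        have e1 : ((i : Int) + T) % N - T ≡ ((i : Int) + T) - T [ZMOD (N : Int)] :=
          Int.ModEq.sub (Int.emod_emod_of_dvd _ dvd_rfl) (Int.ModEq.refl T)
        have e2 : ((i : Int) + T) - T = (i : Int) := by ring
        have e3 := e1
        rw [e2] at e3
        rw [toNat_emod_cast (((i : Int) + T) % N - T) N i e3, Nat.mod_eq_of_lt hi]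
      have hfill := pvFill_eq_map N
        (fun i => (pvWhile (N : Int) s t (i : Int)).toNat) h
        (fun i => PySem.Str.slice val (some (i : Int)) (some ((i : Int) + 1)))
        hhN hgh hhg
      rw [hfill, join_map_chars val N rfl h hhN]
      -- B side
      have hlen : PySem.Str.len val = (N : Int) := by simp [hNdef, hl]
      have hn0 : ¬ (PySem.Str.len val = 0 ∨ ordre ≤ 0) := by
        rw [hlen]
        exact fun h => by rcases h with h | h <;> omega
      have hk : PySem.Int.mod ordre (PySem.Str.len val) = ordre % (N : Int) := by
        rw [hlen, PySem.Int.mod_eq_emod_of_pos hNI]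
      have hkmod : ordre % (N : Int) = ((t % N : Nat) : Int) := by
        rw [← hONat, Int.natCast_emod]
      -- the rotation amount on B's side, as a Nat
      rcases gauche with _ | _
      · -- gauche = false: right rotation, slices at n - k
        have hkNat : (PySem.Str.len val - PySem.Int.mod ordre (PySem.Str.len val)).toNat = N - t % N := by
          rw [hk, hlen, hkmod]
          omega
        have hT : T = (t : Int) := by simp [hTdef, hsdef]
        obtain ⟨k', hk'def⟩ : ∃ k', N - t % N = k' := ⟨_, rfl⟩
        have hk'le : k' ≤ N := by omega
        have hBlist : (decalage_alt val ordre false).toList = l.drop k' ++ l.take k' := by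
          simp only [decalage_alt]
          rw [if_neg hn0, if_neg (by simp)]
          rw [String.toList_append, PySem.Str.toList_slice, PySem.Str.toList_slice]
          simp only [PySem.Chars.slice_eq_listSlice]
          rw [PySem.List.slice_from _ (by rw [hk, hlen]; have := hmodN ordre; omega)]
          rw [PySem.List.slice_to _ (by rw [hk, hlen]; have := hmodN ordre; omega)]
          rw [hkNat, hk'def]
        rw [hBlist, ← List.rotate_eq_drop_append_take hk'le]
        apply List.ext_getElem
        · simp [hNdef]
        · intro m hm1 hm2
          have hm : m < N := by simpa using hm1
          rw [List.getElem_rotate]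
          simp only [List.getElem_map, List.getElem_range]
          rw [List.getD_eq_getElem _ _ (by simpa [hNdef] using hhN m hm)]
          congr 1
          -- h m = (m + k') % N
          simp only [hhdef, hT]
          have hcast : ((m + k' : Nat) : Int) = (m : Int) + ((N : Int) - ((t % N : Nat) : Int)) := by
            have h1 : t % N ≤ N := Nat.le_of_lt (Nat.mod_lt _ hN)
            push_cast
            omega
          have e1 : (m : Int) - (t : Int) ≡ (m : Int) - ((t % N : Nat) : Int) [ZMOD (N : Int)] := by
            refine Int.ModEq.sub (Int.ModEq.refl _) ?_
            rw [Int.natCast_emod]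
            exact (Int.emod_emod_of_dvd _ dvd_rfl).symm
          have e2 : (m : Int) - ((t % N : Nat) : Int) ≡ (m : Int) - ((t % N : Nat) : Int) + N [ZMOD (N : Int)] :=
            Int.emod_eq_add_self_emod
          have e3 : (m : Int) - ((t % N : Nat) : Int) + N = (m : Int) + ((N : Int) - ((t % N : Nat) : Int)) := by ring
          have := toNat_emod_cast ((m : Int) - (t : Int)) N (m + k')
            (by rw [hcast, ← e3]; exact e1.trans e2)
          rw [this]
      · -- gauche = true: left rotation, slices at k
        have hT : T = -(t : Int) := by simp [hTdef, hsdef]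
        have hkNat : (PySem.Int.mod ordre (PySem.Str.len val)).toNat = t % N := by
          rw [hk, hkmod, Int.toNat_natCast]
        obtain ⟨k', hk'def⟩ : ∃ k', t % N = k' := ⟨_, rfl⟩
        have hk'le : k' ≤ N := by
          have := Nat.mod_lt t hN
          omega
        have hBlist : (decalage_alt val ordre true).toList = l.drop k' ++ l.take k' := by
          simp only [decalage_alt]
          rw [if_neg hn0, if_pos trivial]
          rw [String.toList_append, PySem.Str.toList_slice, PySem.Str.toList_slice]
          simp only [PySem.Chars.slice_eq_listSlice]
          rw [PySem.List.slice_from _ (by rw [hk]; exact (hmodN ordre).1)]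
          rw [PySem.List.slice_to _ (by rw [hk]; exact (hmodN ordre).1)]
          rw [hkNat, hk'def]
        rw [hBlist, ← List.rotate_eq_drop_append_take hk'le]
        apply List.ext_getElem
        · simp [hNdef]
        · intro m hm1 hm2
          have hm : m < N := by simpa using hm1
          rw [List.getElem_rotate]
          simp only [List.getElem_map, List.getElem_range]
          rw [List.getD_eq_getElem _ _ (by simpa [hNdef] using hhN m hm)]
          congr 1
          simp only [hhdef, hT]
          have hcast : ((m + k' : Nat) : Int) = (m : Int) + ((t % N : Nat) : Int) := by rw [← hk'def]; push_cast; ring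
          have e1 : (m : Int) - (-(t : Int)) ≡ (m : Int) + ((t % N : Nat) : Int) [ZMOD (N : Int)] := by
            have : (m : Int) - (-(t : Int)) = (m : Int) + (t : Int) := by ring
            rw [this]
            refine Int.ModEq.add (Int.ModEq.refl _) ?_
            rw [Int.natCast_emod]
            exact (Int.emod_emod_of_dvd _ dvd_rfl).symm
          have := toNat_emod_cast ((m : Int) - (-(t : Int))) N (m + k') (by rw [hcast]; exact e1)
          rw [this]
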